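-- pv_equiv track=rewrite | github.com/druskacik/trainbot | ui/views.py | _filter_to_maximal_chains
-- ===== SOURCE A (Python) =====
-- def _is_contiguous_subsequence(short_chain, long_chain):
--     n = len(short_chain)
--     if n > len(long_chain):
--         return False
--     for i in range(len(long_chain) - n + 1):
--         if tuple(long_chain[i : i + n]) == tuple(short_chain):
--             return True
--     return False
--
-- def _filter_to_maximal_chains(canonical_chains):
--     kept = []
--     for candidate in sorted(canonical_chains, key=len, reverse=True):
--         candidate_rev = tuple(reversed(candidate))
--         is_subset = False
--         for existing in kept:
--             existing_rev = tuple(reversed(existing))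
--             if (
--                 _is_contiguous_subsequence(candidate, existing)
--                 or _is_contiguous_subsequence(candidate_rev, existing)
--                 or _is_contiguous_subsequence(candidate, existing_rev)
--                 or _is_contiguous_subsequence(candidate_rev, existing_rev)
--             ):
--                 is_subset = True
--                 break
--         if not is_subset:
--             kept.append(candidate)
--     return kept
-- ===== SOURCE B (Python) =====
-- def _filter_to_maximal_chains(canonical_chains):
--     # Inverted index: for every kept chain, map each element value to its
--     # occurrence positions.  A candidate (in either orientation) can only start
--     # at an occurrence of its first element, so only those positions are
--     # compared instead of scanning every position of every kept chain; the four
--     # orientation tests of the naive version collapse to two by symmetry.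
--     kept = []
--     index = {}  # value -> list of (kept chain as tuple, start position)
--     for candidate in sorted(canonical_chains, key=len, reverse=True):
--         t = tuple(candidate)
--         m = len(t)
--         if m == 0:
--             is_subset = bool(kept)
--         else:
--             is_subset = any(
--                 chain[i : i + m] == u
--                 for u in (t, t[::-1])
--                 for (chain, i) in index.get(u[0], ())
--             )
--         if not is_subset:
--             kept.append(candidate)
--             for i, v in enumerate(t):
--                 index.setdefault(v, []).append((t, i))
--     return kept
-- ===== Notes on version B (the rewrite author's own statement) =====
-- stated objective: faster
-- what changed: Instead of re-scanning every position of every kept chain with a fresh slice comparison for each candidate in four orientations, B maintains an inverted index from element value to its occurrence positions in kept chains, compares the candidate only at occurrences of its first element, and collapses the four orientation tests to two by reversal symmetry.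
import Mathlib
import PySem

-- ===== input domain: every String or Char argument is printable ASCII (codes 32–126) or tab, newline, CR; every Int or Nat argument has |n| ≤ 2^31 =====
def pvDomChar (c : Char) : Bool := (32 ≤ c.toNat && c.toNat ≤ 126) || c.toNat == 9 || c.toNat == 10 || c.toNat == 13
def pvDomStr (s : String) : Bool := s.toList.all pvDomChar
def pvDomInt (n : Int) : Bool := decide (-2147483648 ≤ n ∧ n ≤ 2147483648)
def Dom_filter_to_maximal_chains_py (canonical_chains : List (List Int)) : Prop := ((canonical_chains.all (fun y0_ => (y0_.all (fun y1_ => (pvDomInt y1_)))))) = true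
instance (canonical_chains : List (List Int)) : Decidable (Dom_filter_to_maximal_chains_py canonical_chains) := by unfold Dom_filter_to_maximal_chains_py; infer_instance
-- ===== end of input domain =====

-- B replaces A's scan of every position of every kept chain (with a fresh slice comparison
-- per position, in four orientations) by an inverted index value -> occurrence positions:
-- a candidate is only compared at occurrences of its first element, in two orientations.


-- ===== PORT A =====
-- _is_contiguous_subsequence: sliding-window scan comparing each slice to short_chain.
-- (Python's early 'return True' is the same value as the or-fold; tuple(...) == tuple(...) is list equality.)
def pvIsContig (short_chain long_chain : List Int) : Bool :=
  let n : Int := (short_chain.length : Int)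
  if n > (long_chain.length : Int) then false
  else
    (PySem.List.pyRange 0 ((long_chain.length : Int) - n + 1)).foldl
      (fun found i =>
        found || (PySem.List.slice long_chain (some i) (some (i + n)) == short_chain))
      false

-- _filter_to_maximal_chains: sort by length descending (stable), keep a chain unless it
-- (or its reverse) is a contiguous subsequence of a kept chain (or its reverse).
-- tuple(reversed(x)) is ported as .reverse; the 'break' has the same value as the or-fold.
def filter_to_maximal_chains_py (canonical_chains : List (List Int)) : List (List Int) :=
  (PySem.List.sorted canonical_chains (fun c => (c.length : Int)) true).foldl
    (fun kept candidate =>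
      let candidate_rev := candidate.reverse
      let is_subset :=
        kept.foldl
          (fun b existing =>
            b || (let existing_rev := existing.reverse
                  pvIsContig candidate existing ||
                  pvIsContig candidate_rev existing ||
                  pvIsContig candidate existing_rev ||
                  pvIsContig candidate_rev existing_rev))
          false
      if is_subset then kept else kept ++ [candidate])
    []

-- ===== PORT B =====
-- B's 'any(chain[i:i+m] == u for (chain, i) in index.get(u[0], ()))' for one orientation u
-- (u[0] is u.headD 0; only called with u nonempty).
def pvHits (index : PySem.Dict Int (List (List Int × Int))) (u : List Int) (m : Int) : Bool :=
  ((PySem.Dict.get? index (u.headD 0)).getD []).any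
    (fun p => PySem.List.slice p.1 (some p.2) (some (p.2 + m)) == u)

-- B's registration loop: 'for i, v in enumerate(t): index.setdefault(v, []).append((t, i))'
-- (setdefault+append ported as read-then-insert, which overwrites in place like Python).
def pvIndexAdd (index : PySem.Dict Int (List (List Int × Int))) (t : List Int) :
    PySem.Dict Int (List (List Int × Int)) :=
  (PySem.List.enumerate t).foldl
    (fun d p => PySem.Dict.insert d p.2 ((PySem.Dict.get? d p.2).getD [] ++ [(t, p.1)]))
    index

-- B: one pass over the sorted chains keeping an inverted index of the kept chains;
-- the two-orientation generator 'any(...)' is the or of the two pvHits calls (t[::-1] = .reverse).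
def filter_to_maximal_chains_py_alt (canonical_chains : List (List Int)) : List (List Int) :=
  ((PySem.List.sorted canonical_chains (fun c => (c.length : Int)) true).foldl
    (fun (st : List (List Int) × PySem.Dict Int (List (List Int × Int))) candidate =>
      let m : Int := (candidate.length : Int)
      let is_subset :=
        if m == 0 then !st.1.isEmpty
        else pvHits st.2 candidate m || pvHits st.2 candidate.reverse m
      if is_subset then st
      else (st.1 ++ [candidate], pvIndexAdd st.2 candidate))
    ([], PySem.Dict.empty)).1

-- ===== PRECONDITION & SPEC =====
def Spec_filter_to_maximal_chains_py (canonical_chains : List (List Int)) (out : List (List Int)) : Prop := out = filter_to_maximal_chains_py_alt canonical_chains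
instance (canonical_chains : List (List Int)) (out : List (List Int)) : Decidable (Spec_filter_to_maximal_chains_py canonical_chains out) := by unfold Spec_filter_to_maximal_chains_py; infer_instance

-- ===== CLAIM (what is proved, stated in full; the proofs are below) =====
def Claim_equal_filter_to_maximal_chains_py : Prop := ∀ (canonical_chains : List (List Int)), Dom_filter_to_maximal_chains_py canonical_chains → Spec_filter_to_maximal_chains_py canonical_chains (filter_to_maximal_chains_py canonical_chains)

-- ===== LEMMAS AND PROOFS =====

-- or-fold is List.any
theorem pv_foldl_or {α : Type} (xs : List α) (p : α → Bool) (b : Bool) :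
    xs.foldl (fun acc x => acc || p x) b = (b || xs.any p) := by
  induction xs generalizing b with
  | nil => simp
  | cons x xs ih => simp [List.any_cons, ih, Bool.or_assoc]

-- take-of-drop characterisation of contiguous subsequences
theorem pv_infix_iff (s l : List Int) :
    s <:+: l ↔ ∃ k, k + s.length ≤ l.length ∧ (l.drop k).take s.length = s := by
  constructor
  · rintro ⟨u, v, rfl⟩
    exact ⟨u.length, by simp, by simp⟩
  · rintro ⟨k, hk, hs⟩
    refine ⟨l.take k, l.drop (k + s.length), ?_⟩
    have h1 : l.drop k = s ++ l.drop (k + s.length) := by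
      conv_lhs => rw [← List.take_append_drop s.length (l.drop k)]
      rw [hs, List.drop_drop]
    rw [List.append_assoc, ← h1, List.take_append_drop]

theorem pv_isContig_iff (s l : List Int) : pvIsContig s l = true ↔ s <:+: l := by
  unfold pvIsContig
  by_cases h : (s.length : Int) > (l.length : Int)
  · simp only [h, if_true]
    constructor
    · intro hc; exact absurd hc (by simp)
    · intro hinf; exact absurd hinf.length_le (by omega)
  · simp only [h, if_false, pv_foldl_or, Bool.false_or, List.any_eq_true]
    rw [pv_infix_iff]
    constructor
    · rintro ⟨i, hi, hslice⟩
      rw [PySem.List.mem_pyRange_one] at hi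
      obtain ⟨k, rfl⟩ : ∃ k : Nat, i = (k : Int) := ⟨i.toNat, by omega⟩
      refine ⟨k, by omega, ?_⟩
      have := PySem.List.slice_natCast_add l k s.length
      rw [this] at hslice
      exact eq_of_beq hslice
    · rintro ⟨k, hk, hs⟩
      refine ⟨(k : Int), ?_, ?_⟩
      · rw [PySem.List.mem_pyRange_one]; omega
      · rw [PySem.List.slice_natCast_add l k s.length, hs]; simp

theorem pv_isContig_nil (l : List Int) : pvIsContig [] l = true := by
  rw [pv_isContig_iff]; exact List.nil_infix

-- the index invariant: entry lists hold exactly the occurrences of v in kept chains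
def pvInv (kept : List (List Int)) (index : PySem.Dict Int (List (List Int × Int))) : Prop :=
  ∀ (v : Int) (e : List Int) (i : Int),
    (e, i) ∈ (PySem.Dict.get? index v).getD [] ↔
      e ∈ kept ∧ ∃ k : Nat, i = (k : Int) ∧ e[k]? = some v

-- effect of the registration fold on one entry list (membership)
theorem pv_mem_foldIns (T : List Int) (ps : List (Int × Int))
    (d : PySem.Dict Int (List (List Int × Int))) (v : Int) (e : List Int) (i : Int) :
    (e, i) ∈ (PySem.Dict.get?
        (ps.foldl (fun d p =>
          PySem.Dict.insert d p.2 ((PySem.Dict.get? d p.2).getD [] ++ [(T, p.1)])) d) v).getD []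
      ↔ (e, i) ∈ (PySem.Dict.get? d v).getD [] ∨ ∃ p ∈ ps, p.2 = v ∧ e = T ∧ i = p.1 := by
  induction ps generalizing d with
  | nil => simp
  | cons p ps ih =>
    simp only [List.foldl_cons, ih, List.mem_cons]
    by_cases hv : v = p.2
    · subst hv
      rw [PySem.Dict.get?_insert_self]
      simp only [Option.getD_some, List.mem_append, List.mem_singleton, Prod.mk.injEq]
      constructor
      · rintro ((h | ⟨he, hi⟩) | ⟨q, hq, h1, h2, h3⟩)
        · exact Or.inl h
        · exact Or.inr ⟨p, Or.inl rfl, rfl, he, hi⟩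
        · exact Or.inr ⟨q, Or.inr hq, h1, h2, h3⟩
      · rintro (h | ⟨q, (rfl | hq), h1, h2, h3⟩)
        · exact Or.inl (Or.inl h)
        · exact Or.inl (Or.inr ⟨h2, h3⟩)
        · exact Or.inr ⟨q, hq, h1, h2, h3⟩
    · rw [PySem.Dict.get?_insert_of_ne _ _ hv]
      constructor
      · rintro (h | ⟨q, hq, h1, h2, h3⟩)
        · exact Or.inl h
        · exact Or.inr ⟨q, Or.inr hq, h1, h2, h3⟩
      · rintro (h | ⟨q, (rfl | hq), h1, h2, h3⟩)
        · exact Or.inl h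
        · exact absurd h1.symm hv
        · exact Or.inr ⟨q, hq, h1, h2, h3⟩

-- membership in enumerate
theorem pv_mem_enumerate (t : List Int) (s : Int) (p : Int × Int) :
    p ∈ PySem.List.enumerate t s ↔ ∃ k : Nat, p.1 = s + (k : Int) ∧ t[k]? = some p.2 := by
  induction t generalizing s with
  | nil => simp
  | cons x t ih =>
    rw [PySem.List.enumerate_cons]
    simp only [List.mem_cons, ih]
    constructor
    · rintro (rfl | ⟨k, h1, h2⟩)
      · exact ⟨0, by simp⟩
      · exact ⟨k + 1, by push_cast; omega, by simpa using h2⟩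
    · rintro ⟨k, h1, h2⟩
      cases k with
      | zero =>
        simp at h2
        left
        obtain ⟨p1, p2⟩ := p
        simp_all
      | succ k =>
        right
        exact ⟨k, by push_cast at h1 ⊢; omega, by simpa using h2⟩

theorem pv_inv_indexAdd (kept : List (List Int)) (index : PySem.Dict Int (List (List Int × Int)))
    (t : List Int) (hinv : pvInv kept index) : pvInv (kept ++ [t]) (pvIndexAdd index t) := by
  intro v e i
  unfold pvIndexAdd
  rw [pv_mem_foldIns, hinv]
  simp only [List.mem_append, List.mem_singleton]
  constructor
  · rintro (⟨he, hk⟩ | ⟨p, hp, rfl, rfl, rfl⟩)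
    · exact ⟨Or.inl he, hk⟩
    · rw [pv_mem_enumerate] at hp
      obtain ⟨k, h1, h2⟩ := hp
      exact ⟨Or.inr rfl, k, by omega, h2⟩
  · rintro ⟨(he | rfl), k, hk, hv⟩
    · exact Or.inl ⟨he, k, hk, hv⟩
    · exact Or.inr ⟨((k : Int), v), by rw [pv_mem_enumerate]; exact ⟨k, by omega, hv⟩, rfl, rfl, hk⟩

-- a hit in the index is exactly an occurrence in a kept chain (nonempty candidate)
theorem pv_hits_iff (kept : List (List Int)) (index : PySem.Dict Int (List (List Int × Int)))
    (u : List Int) (hne : u ≠ []) (hinv : pvInv kept index) :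
    pvHits index u (u.length : Int) = true ↔ ∃ e ∈ kept, u <:+: e := by
  unfold pvHits
  rw [List.any_eq_true]
  constructor
  · rintro ⟨⟨e, i⟩, hmem, hslice⟩
    rw [hinv] at hmem
    obtain ⟨he, k, rfl, -⟩ := hmem
    have hsl := PySem.List.slice_natCast_add e k u.length
    rw [hsl] at hslice
    have heq := eq_of_beq hslice
    refine ⟨e, he, (pv_infix_iff u e).mpr ⟨k, ?_, heq⟩⟩
    have h2 := congrArg List.length heq
    rw [List.length_take, List.length_drop] at h2
    have h3 := u.length_pos_of_ne_nil hne
    omega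
  · rintro ⟨e, he, hinf⟩
    obtain ⟨k, hk, hs⟩ := (pv_infix_iff u e).mp hinf
    have hu0 : u.headD 0 ∈ ({e[k]?.getD 0} : Set Int) := by
      obtain ⟨x, u', rfl⟩ := List.exists_cons_of_ne_nil hne
      have : e[k]? = some x := by
        have : (e.drop k).take (x :: u').length ≠ [] := by rw [hs]; simp
        have h0 : ((e.drop k).take (x :: u').length)[0]? = some x := by rw [hs]; rfl
        simpa [List.getElem?_take, List.getElem?_drop] using h0
      simp [this]
    have hek : e[k]? = some (u.headD 0) := by
      simp only [Set.mem_singleton_iff] at hu0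
      have hklt : k < e.length := by
        have := u.length_pos_of_ne_nil hne
        omega
      rw [List.getElem?_eq_getElem hklt] at hu0 ⊢
      simp at hu0 ⊢
      omega
    refine ⟨(e, (k : Int)), ?_, ?_⟩
    · rw [hinv]; exact ⟨he, k, rfl, hek⟩
    · rw [PySem.List.slice_natCast_add e k u.length, hs]; simp

-- the two per-candidate conditions agree under the index invariant
theorem pv_cond_eq (kept : List (List Int)) (index : PySem.Dict Int (List (List Int × Int)))
    (c : List Int) (hinv : pvInv kept index) :
    (kept.foldl
        (fun b existing =>
          b || (let existing_rev := existing.reverse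
                pvIsContig c existing ||
                pvIsContig c.reverse existing ||
                pvIsContig c existing_rev ||
                pvIsContig c.reverse existing_rev))
        false)
      = (if ((c.length : Int) == 0) then !kept.isEmpty
         else pvHits index c (c.length : Int) || pvHits index c.reverse (c.length : Int)) := by
  rw [pv_foldl_or, Bool.false_or]
  by_cases hc : c = []
  · subst hc
    simp only [List.length_nil, Int.natCast_zero, beq_self_eq_true, if_true]
    cases kept with
    | nil => rfl
    | cons e kept => simp [pv_isContig_nil]
  · have hm : ¬ ((c.length : Int) == 0) = true := by
      simp only [beq_iff_eq]
      have := c.length_pos_of_ne_nil hc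
      omega
    simp only [hm, if_false, Bool.false_eq_true]
    have hrev : (c.reverse.length : Int) = (c.length : Int) := by simp
    have h1 := pv_hits_iff kept index c hc hinv
    have h2 := pv_hits_iff kept index c.reverse (by simpa using hc) hinv
    rw [hrev] at h2
    rcases Bool.eq_false_or_eq_true (pvHits index c (c.length : Int) || pvHits index c.reverse (c.length : Int)) with hr | hr
    · rw [hr, List.any_eq_true]
      rcases Bool.or_eq_true_iff.mp hr with hh | hh
      · obtain ⟨e, he, hin⟩ := h1.mp hh
        exact ⟨e, he, by simp [pv_isContig_iff, hin]⟩
      · obtain ⟨e, he, hin⟩ := h2.mp hh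
        exact ⟨e, he, by simp [pv_isContig_iff, hin]⟩
    · rw [hr, List.any_eq_false]
      intro e he
      have hb : ¬ (pvHits index c (c.length : Int) = true) ∧
          ¬ (pvHits index c.reverse (c.length : Int) = true) := by
        constructor <;> intro h <;> rw [h] at hr <;> simp at hr
      have hn1 : ∀ e ∈ kept, ¬ c <:+: e := fun e he h => hb.1 (h1.mpr ⟨e, he, h⟩)
      have hn2 : ∀ e ∈ kept, ¬ c.reverse <:+: e := fun e he h => hb.2 (h2.mpr ⟨e, he, h⟩)
      simp only [pv_isContig_iff, Bool.or_eq_true]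
      push Not
      refine ⟨⟨⟨hn1 e he, hn2 e he⟩, fun h => hn2 e he ?_⟩, fun h => hn1 e he ?_⟩
      · simpa using List.reverse_infix.mpr h
      · exact List.reverse_infix.mp h

-- main loop invariant: A's fold equals the first component of B's fold
theorem pv_loop (ls kept : List (List Int)) (index : PySem.Dict Int (List (List Int × Int)))
    (hinv : pvInv kept index) :
    ls.foldl
      (fun kept candidate =>
        let candidate_rev := candidate.reverse
        let is_subset :=
          kept.foldl
            (fun b existing =>
              b || (let existing_rev := existing.reverse
                    pvIsContig candidate existing ||
                    pvIsContig candidate_rev existing ||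
                    pvIsContig candidate existing_rev ||
                    pvIsContig candidate_rev existing_rev))
            false
        if is_subset then kept else kept ++ [candidate])
      kept
    = (ls.foldl
        (fun (st : List (List Int) × PySem.Dict Int (List (List Int × Int))) candidate =>
          let m : Int := (candidate.length : Int)
          let is_subset :=
            if m == 0 then !st.1.isEmpty
            else pvHits st.2 candidate m || pvHits st.2 candidate.reverse m
          if is_subset then st
          else (st.1 ++ [candidate], pvIndexAdd st.2 candidate))
        (kept, index)).1 := by
  induction ls generalizing kept index with
  | nil => rfl
  | cons c ls ih =>
    simp only [List.foldl_cons]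
    rw [pv_cond_eq kept index c hinv]
    by_cases hc : (if ((c.length : Int) == 0) then !kept.isEmpty
        else pvHits index c (c.length : Int) || pvHits index c.reverse (c.length : Int)) = true
    · rw [hc]; simp only [if_true]
      exact ih kept index hinv
    · rw [Bool.not_eq_true] at hc
      rw [hc]; simp only [Bool.false_eq_true, if_false]
      exact ih (kept ++ [c]) (pvIndexAdd index c) (pv_inv_indexAdd kept index c hinv)

-- ===== VERDICT (by name: the statement is the Claim_ definition above) =====
theorem filter_to_maximal_chains_py_spec : Claim_equal_filter_to_maximal_chains_py := by
  intro canonical_chains _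
  unfold Spec_filter_to_maximal_chains_py filter_to_maximal_chains_py filter_to_maximal_chains_py_alt
  exact pv_loop _ [] PySem.Dict.empty (by intro v e i; simp [PySem.Dict.empty, PySem.Dict.get?])
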